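-- pv_equiv track=rewrite | github.com/reanim86/requests_task1 | main.py | search_hero
-- ===== SOURCE A (Python) =====
-- def search_hero(hero_list):
--     hulk = {}
--     captain_america = {}
--     thanos = {}
--     for hero in hero_list:
--         if hero['name'] == 'Hulk':
--             hulk = hero
--         elif hero['name'] == 'Captain America':
--             captain_america = hero
--         elif hero['name'] == 'Thanos':
--             thanos = hero
--     list_hero = (hulk, captain_america, thanos)
--     return list_hero
-- ===== SOURCE B (Python) =====
-- def search_hero(hero_list):
--     def last_named(name):
--         for hero in reversed(hero_list):
--             if hero['name'] == name:
--                 return hero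
--         return {}
--     return (last_named('Hulk'), last_named('Captain America'), last_named('Thanos'))
-- ===== Notes on version B (the rewrite author's own statement) =====
-- stated objective: alternative
-- what changed: Replaces A's single forward pass with if/elif state updates by three independent backward scans that each return the first (i.e. last-occurring) hero with the wanted name and stop early.
import Mathlib
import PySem

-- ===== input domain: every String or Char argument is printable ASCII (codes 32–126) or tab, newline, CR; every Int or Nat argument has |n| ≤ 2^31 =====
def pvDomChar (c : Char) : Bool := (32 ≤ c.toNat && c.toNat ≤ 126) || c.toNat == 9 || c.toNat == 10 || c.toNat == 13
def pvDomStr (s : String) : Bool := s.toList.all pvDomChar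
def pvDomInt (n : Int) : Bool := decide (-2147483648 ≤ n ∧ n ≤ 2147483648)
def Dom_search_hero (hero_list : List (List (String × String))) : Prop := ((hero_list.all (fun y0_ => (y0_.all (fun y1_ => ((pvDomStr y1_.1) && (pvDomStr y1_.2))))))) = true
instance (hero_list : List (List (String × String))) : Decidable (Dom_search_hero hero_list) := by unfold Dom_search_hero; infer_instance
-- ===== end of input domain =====

-- B replaces A's single forward if/elif pass by three independent backward scans, each
-- returning the first (= last-occurring) hero with the wanted name and stopping early.

-- ===== PORT A =====
-- hero['name'] (KeyError when absent, excluded by Pre_) ported as Dict.getD "name" ""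
def search_hero (hero_list : List (List (String × String))) : (List (String × String)) × (List (String × String)) × (List (String × String)) :=
  let st := hero_list.foldl (fun s hero =>
    let n := (PySem.Dict.mk hero).getD "name" ""
    if n = "Hulk" then (hero, s.2.1, s.2.2)
    else if n = "Captain America" then (s.1, hero, s.2.2)
    else if n = "Thanos" then (s.1, s.2.1, hero)
    else s) (([], [], []))
  st

-- ===== PORT B =====
-- B's inner 'for hero in reversed(hero_list): if match return hero; return {}' loop
def lastNamed (name : String) (l : List (List (String × String))) : List (String × String) :=
  match l with
  | [] => []
  | hero :: t => if (PySem.Dict.mk hero).getD "name" "" = name then hero else lastNamed name t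

def search_hero_alt (hero_list : List (List (String × String))) : (List (String × String)) × (List (String × String)) × (List (String × String)) :=
  (lastNamed "Hulk" hero_list.reverse,
   lastNamed "Captain America" hero_list.reverse,
   lastNamed "Thanos" hero_list.reverse)

-- ===== PRECONDITION & SPEC =====
-- Pre_ excludes exactly the inputs on which a hero dict lacks the "name" key, where A raises KeyError.
def Pre_search_hero (hero_list : List (List (String × String))) : Prop :=
  hero_list.all (fun hero => (PySem.Dict.mk hero).contains "name") = true
instance (hero_list : List (List (String × String))) : Decidable (Pre_search_hero hero_list) := by unfold Pre_search_hero; infer_instance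
def pvWitness_search_hero : (List (List (String × String))) := [[("name", "Hulk"), ("id", "1")], [("name", "Loki")]]

def Spec_search_hero (hero_list : List (List (String × String))) (out : (List (String × String)) × (List (String × String)) × (List (String × String))) : Prop := out = search_hero_alt hero_list
instance (hero_list : List (List (String × String))) (out : (List (String × String)) × (List (String × String)) × (List (String × String))) : Decidable (Spec_search_hero hero_list out) := by unfold Spec_search_hero; infer_instance

-- ===== CLAIM (what is proved, stated in full; the proofs are below) =====
def Claim_equal_search_hero : Prop := ∀ (hero_list : List (List (String × String))), Dom_search_hero hero_list → Pre_search_hero hero_list → Spec_search_hero hero_list (search_hero hero_list)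

-- ===== LEMMAS AND PROOFS =====

-- backward-scan over a state: lastNamed with explicit default, for the induction
def lastNamedD (name : String) (l : List (List (String × String))) (d : List (String × String)) : List (String × String) :=
  match l with
  | [] => d
  | hero :: t => if (PySem.Dict.mk hero).getD "name" "" = name then hero else lastNamedD name t d

theorem lastNamedD_nil_default (name : String) (l : List (List (String × String))) :
    lastNamedD name l [] = lastNamed name l := by
  induction l with
  | nil => rfl
  | cons h t ih => simp [lastNamedD, lastNamed, ih]

theorem lastNamedD_append_single (name : String) (xs : List (List (String × String)))
    (h : List (String × String)) (d : List (String × String)) :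
    lastNamedD name (xs ++ [h]) d
      = lastNamedD name xs (if (PySem.Dict.mk h).getD "name" "" = name then h else d) := by
  induction xs with
  | nil => rfl
  | cons x t ih => simp [lastNamedD, ih]

theorem search_hero_inv (l : List (List (String × String)))
    (s : (List (String × String)) × (List (String × String)) × (List (String × String))) :
    l.foldl (fun s hero =>
      let n := (PySem.Dict.mk hero).getD "name" ""
      if n = "Hulk" then (hero, s.2.1, s.2.2)
      else if n = "Captain America" then (s.1, hero, s.2.2)
      else if n = "Thanos" then (s.1, s.2.1, hero)
      else s) s
    = (lastNamedD "Hulk" l.reverse s.1,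
       lastNamedD "Captain America" l.reverse s.2.1,
       lastNamedD "Thanos" l.reverse s.2.2) := by
  induction l generalizing s with
  | nil => rfl
  | cons hero t ih =>
    simp only [List.foldl_cons, List.reverse_cons, lastNamedD_append_single]
    rw [ih]
    set n := (PySem.Dict.mk hero).getD "name" "" with hn
    by_cases h1 : n = "Hulk"
    · have h2 : n ≠ "Captain America" := by rw [h1]; decide
      have h3 : n ≠ "Thanos" := by rw [h1]; decide
      simp [h1]
    · by_cases h2 : n = "Captain America"
      · have h3 : n ≠ "Thanos" := by rw [h2]; decide
        simp [h2]
      · by_cases h3 : n = "Thanos"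
        · simp [h3]
        · simp [h1, h2, h3]

-- ===== VERDICT (by name: the statement is the Claim_ definition above) =====
theorem search_hero_spec : Claim_equal_search_hero := by
  intro l _ _
  show search_hero l = search_hero_alt l
  simp [search_hero, search_hero_alt, search_hero_inv, lastNamedD_nil_default]
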